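-- pv_equiv track=rewrite | github.com/Aarav500/Assembly_line | backend/c-012/transpilers/py_to_js.py | _detect_indent_size
-- ===== SOURCE A (Python) =====
-- from typing import List, Tuple
--
-- def _detect_indent_size(lines: List[str]) -> int:
--     sizes = []
--     for ln in lines:
--         if not ln.strip():
--             continue
--         leading = len(ln) - len(ln.lstrip(' '))
--         if leading > 0:
--             sizes.append(leading)
--     if not sizes:
--         return 4
--     smallest = min(sizes)
--     # Try to find gcd-like common indent size
--     for size in (2, 4, smallest):
--         if all((s % size == 0) for s in sizes):
--             return size
--     return smallest or 4
-- ===== SOURCE B (Python) =====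
-- from typing import List, Tuple
--
-- def _detect_indent_size(lines: List[str]) -> int:
--     # One pass, O(1) state: track whether every positive leading-space count is
--     # even and the smallest such count; A's answer is 2 iff all are even (the
--     # '4' candidate is unreachable: divisible by 4 implies divisible by 2),
--     # otherwise the smallest count, and 4 when there are no indented lines.
--     all_even = True
--     smallest = None
--     for ln in lines:
--         if not ln.strip():
--             continue
--         leading = len(ln) - len(ln.lstrip(' '))
--         if leading > 0:
--             all_even = all_even and leading % 2 == 0
--             smallest = leading if smallest is None or leading < smallest else smallest
--     if smallest is None:
--         return 4
--     return 2 if all_even else smallest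
-- ===== Notes on version B (the rewrite author's own statement) =====
-- stated objective: simpler
-- what changed: B replaces A's collected list of indent sizes plus three full rescans (and the min pass) with a single pass keeping only O(1) state (are all leading-space counts even?, the smallest count), using the facts that A's candidate 4 is unreachable (divisibility by 4 implies divisibility by 2) and that the 'smallest' candidate returns smallest whether or not it divides all sizes.
import Mathlib
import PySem

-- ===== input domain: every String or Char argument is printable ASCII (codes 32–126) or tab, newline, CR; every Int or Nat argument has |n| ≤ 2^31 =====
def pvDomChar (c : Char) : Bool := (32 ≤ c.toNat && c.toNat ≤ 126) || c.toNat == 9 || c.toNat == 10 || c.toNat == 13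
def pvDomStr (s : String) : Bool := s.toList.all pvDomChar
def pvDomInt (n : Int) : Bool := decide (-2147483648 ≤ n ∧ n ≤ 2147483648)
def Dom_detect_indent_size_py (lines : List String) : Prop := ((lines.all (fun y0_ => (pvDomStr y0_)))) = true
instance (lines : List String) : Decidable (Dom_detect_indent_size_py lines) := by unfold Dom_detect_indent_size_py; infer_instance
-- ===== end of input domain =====

-- B replaces A's list of indent sizes and three full rescans by a single pass
-- keeping only two O(1) facts (all counts even?, smallest count) — objective: simpler.

-- ===== PORT A =====
-- loop body of A's collection loop; ln.lstrip(' ') is ported exactly as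
-- dropping the leading ' ' characters (dropWhile), which is what it does.
def pvAStep (sizes : List Int) (ln : String) : List Int :=
  if PySem.Str.strip ln = "" then sizes
  else
    let leading : Int := (ln.toList.length : Int) - ((ln.toList.dropWhile (fun c => c == ' ')).length : Int)
    if leading > 0 then sizes ++ [leading] else sizes

def detect_indent_size_py (lines : List String) : Int :=
  let sizes := lines.foldl pvAStep []
  if sizes = [] then 4
  else
    let smallest := (PySem.List.min? sizes (fun x => x)).getD 0  -- min of a nonempty list; getD unreachable
    -- for size in (2, 4, smallest): early return ported as an if-chain
    if sizes.all (fun s => PySem.Int.mod s 2 == 0) then 2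
    else if sizes.all (fun s => PySem.Int.mod s 4 == 0) then 4
    else if sizes.all (fun s => PySem.Int.mod s smallest == 0) then smallest
    else if smallest = 0 then 4 else smallest  -- `smallest or 4`

-- ===== PORT B =====
-- loop body of B's single pass: state = (all counts so far even?, smallest so far)
def pvBStep (st : Bool × Option Int) (ln : String) : Bool × Option Int :=
  if PySem.Str.strip ln = "" then st
  else
    let leading : Int := (ln.toList.length : Int) - ((ln.toList.dropWhile (fun c => c == ' ')).length : Int)
    if leading > 0 then
      (st.1 && (PySem.Int.mod leading 2 == 0),
       some (match st.2 with
             | none => leading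
             | some m => if leading < m then leading else m))
    else st

def detect_indent_size_py_alt (lines : List String) : Int :=
  let st := lines.foldl pvBStep (true, none)
  match st.2 with
  | none => 4
  | some smallest => if st.1 then 2 else smallest

-- ===== PRECONDITION & SPEC =====
def Spec_detect_indent_size_py (lines : List String) (out : Int) : Prop := out = detect_indent_size_py_alt lines
instance (lines : List String) (out : Int) : Decidable (Spec_detect_indent_size_py lines out) := by unfold Spec_detect_indent_size_py; infer_instance

-- ===== CLAIM (what is proved, stated in full; the proofs are below) =====
def Claim_equal_detect_indent_size_py : Prop := ∀ (lines : List String), Dom_detect_indent_size_py lines → Spec_detect_indent_size_py lines (detect_indent_size_py lines)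

-- ===== LEMMAS AND PROOFS =====

/-- The min-tracking step of B, named for the proofs. -/
def pvMinStep (o : Option Int) (x : Int) : Option Int :=
  some (match o with | none => x | some m => if x < m then x else m)

/-- B's per-line step computes exactly (all-even?, running min) of A's list. -/
lemma pv_step_corr (acc : List Int) (ln : String) :
    pvBStep (acc.all (fun s => PySem.Int.mod s 2 == 0), acc.foldl pvMinStep none) ln
      = ((pvAStep acc ln).all (fun s => PySem.Int.mod s 2 == 0),
         (pvAStep acc ln).foldl pvMinStep none) := by
  simp only [pvAStep, pvBStep]
  split_ifs with h hl
  · rfl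
  · simp [List.all_append, List.foldl_append, pvMinStep]
  · rfl

lemma pv_fold_corr (lines : List String) : ∀ acc : List Int,
    lines.foldl pvBStep (acc.all (fun s => PySem.Int.mod s 2 == 0), acc.foldl pvMinStep none)
      = ((lines.foldl pvAStep acc).all (fun s => PySem.Int.mod s 2 == 0),
         (lines.foldl pvAStep acc).foldl pvMinStep none) := by
  induction lines with
  | nil => intro acc; rfl
  | cons ln rest ih =>
    intro acc
    simp only [List.foldl_cons, pv_step_corr]
    exact ih (pvAStep acc ln)

/-- A's collection loop only appends positive numbers. -/
lemma pv_fold_pos (lines : List String) : ∀ acc : List Int, (∀ x ∈ acc, 0 < x) →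
    ∀ x ∈ lines.foldl pvAStep acc, 0 < x := by
  induction lines with
  | nil => intro acc h; simpa using h
  | cons ln rest ih =>
    intro acc h
    refine ih (pvAStep acc ln) ?_
    intro x hx
    simp only [pvAStep] at hx
    split_ifs at hx with hs hl
    · exact h x hx
    · rcases List.mem_append.1 hx with h1 | h1
      · exact h x h1
      · rw [List.mem_singleton.1 h1]; omega
    · exact h x hx

lemma pv_minfold (t : List Int) : ∀ x : Int, t.foldl pvMinStep (some x) = some (t.foldl min x) := by
  induction t with
  | nil => intro x; rfl
  | cons y t ih =>
    intro x
    simp only [List.foldl_cons]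
    have : pvMinStep (some x) y = some (min x y) := by
      simp only [pvMinStep, min_def]
      split_ifs <;> (first | rfl | omega)
    rw [this, ih]

/-- For a nonempty list, B's running min is Python's min. -/
lemma pv_minfold_eq_min? (h : Int) (t : List Int) :
    (h :: t).foldl pvMinStep none = PySem.List.min? (h :: t) (fun x => x) := by
  rw [PySem.List.min?_id_cons]
  simp only [List.foldl_cons]
  exact pv_minfold t h

lemma pv_mod4_mod2 (s : Int) (h : (PySem.Int.mod s 4 == 0) = true) :
    (PySem.Int.mod s 2 == 0) = true := by
  simp only [PySem.Int.mod, beq_iff_eq] at h ⊢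
  have h4 : (4 : Int) ∣ s := Int.dvd_iff_fmod_eq_zero.2 h
  exact Int.dvd_iff_fmod_eq_zero.1 (dvd_trans ⟨2, by norm_num⟩ h4)

-- ===== VERDICT (by name: the statement is the Claim_ definition above) =====
theorem detect_indent_size_py_spec : Claim_equal_detect_indent_size_py := by
  intro lines _
  unfold Spec_detect_indent_size_py detect_indent_size_py detect_indent_size_py_alt
  have hcorr := pv_fold_corr lines []
  simp only [List.all_nil, List.foldl_nil] at hcorr
  rw [hcorr]
  cases hL : lines.foldl pvAStep [] with
  | nil => simp
  | cons h t =>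
    have hpos : ∀ x ∈ h :: t, 0 < x := fun x hx => pv_fold_pos lines [] (by simp) x (hL ▸ hx)
    rw [pv_minfold_eq_min? h t]
    rcases hmin : PySem.List.min? (h :: t) (fun x => x) with _ | m
    · exact absurd ((PySem.List.min?_eq_none_iff _ _).1 hmin) (by simp)
    · have hm : 0 < m := hpos m (PySem.List.min?_mem hmin)
      simp only [hmin, Option.getD_some]
      rw [if_neg (List.cons_ne_nil h t)]
      by_cases he : ((h :: t).all fun s => PySem.Int.mod s 2 == 0) = true
      · rw [if_pos he, if_pos he]
      · rw [if_neg he, if_neg he]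
        have h4 : ¬ (((h :: t).all fun s => PySem.Int.mod s 4 == 0) = true) := by
          intro hall
          exact he (by
            rw [List.all_eq_true] at hall ⊢
            exact fun s hs => pv_mod4_mod2 s (hall s hs))
        rw [if_neg h4]
        have hm0 : ¬ (m = 0) := by omega
        by_cases h3 : ((h :: t).all fun s => PySem.Int.mod s m == 0) = true
        · rw [if_pos h3]
        · rw [if_neg h3, if_neg hm0]
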